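-- pv_equiv track=rewrite | github.com/Carlanga213/Estrategias_Algoritmicas | Notas_Libreria/codigos_ejercicios/E09_comparacion_heapsort_shellsort.py | contar_movimientos_shell
-- ===== SOURCE A (Python) =====
-- def contar_movimientos_shell(arreglo):
--     movimientos = 0
--     n = len(arreglo)
--     h = 1
--     while h < n // 3:
--         h = 3 * h + 1
--     while h > 0:
--         for i in range(h, n):
--             temp = arreglo[i]
--             movimientos += 1
--             j = i
--             while j >= h and arreglo[j - h] > temp:
--                 arreglo[j] = arreglo[j - h]
--                 movimientos += 1
--                 j -= h
--             arreglo[j] = temp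
--             movimientos += 1
--         h //= 3
--     return movimientos
-- ===== SOURCE B (Python) =====
-- def _msort_count(a):
--     # merge sort returning (sorted list, number of inversions)
--     if len(a) <= 1:
--         return a, 0
--     m = len(a) // 2
--     left, il = _msort_count(a[:m])
--     right, ir = _msort_count(a[m:])
--     merged = []
--     inv = il + ir
--     i = j = 0
--     while i < len(left) and j < len(right):
--         if right[j] < left[i]:
--             merged.append(right[j])
--             inv += len(left) - i
--             j += 1
--         else:
--             merged.append(left[i])
--             i += 1
--     merged.extend(left[i:])
--     merged.extend(right[j:])
--     return merged, inv
--
--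
-- def contar_movimientos_shell(arreglo):
--     # Different algorithm: for each gap h, each residue-class subsequence is sorted
--     # by merge sort while counting its inversions; shellsort's data movements for a
--     # pass equal 2*(n-h) (one read + one write per inserted element) plus the total
--     # number of gapped inversions (one shift per inversion).  Mutates `arreglo` in
--     # place to the same final state as the original.
--     n = len(arreglo)
--     h = 1
--     while h < n // 3:
--         h = 3 * h + 1
--     movimientos = 0
--     while h > 0:
--         movimientos += 2 * max(0, n - h)
--         for start in range(h):
--             s, inv = _msort_count(arreglo[start::h])
--             arreglo[start::h] = s
--             movimientos += inv
--         h //= 3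
--     return movimientos
-- ===== Notes on version B (the rewrite author's own statement) =====
-- stated objective: alternative
-- what changed: Each gap pass is computed per residue class: every class subsequence arreglo[start::h] is merge-sorted while counting its inversions, and the pass's movement total is obtained arithmetically as 2*(n-h) plus those inversions, replacing A's element-by-element gapped insertion scan with its per-shift counter.
import Mathlib
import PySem

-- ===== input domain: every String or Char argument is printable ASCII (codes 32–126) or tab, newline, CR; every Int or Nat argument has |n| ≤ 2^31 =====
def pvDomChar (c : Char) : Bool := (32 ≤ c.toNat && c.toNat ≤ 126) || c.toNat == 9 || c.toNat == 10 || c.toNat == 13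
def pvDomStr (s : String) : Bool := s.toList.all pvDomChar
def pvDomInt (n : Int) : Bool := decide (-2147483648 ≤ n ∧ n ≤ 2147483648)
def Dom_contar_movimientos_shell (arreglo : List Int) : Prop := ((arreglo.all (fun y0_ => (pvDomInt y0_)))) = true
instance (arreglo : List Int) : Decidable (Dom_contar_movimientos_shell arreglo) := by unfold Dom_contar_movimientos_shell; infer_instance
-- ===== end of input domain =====

-- B counts each gap pass arithmetically: it merge-sorts every residue-class subsequence
-- while counting its inversions (movements = 2*(n-h) + inversions per pass), instead of
-- A's element-by-element gapped insertion with a shift counter (objective: alternative).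
-- Both Pythons sort `arreglo` in place to the same final state; the equivalence proved
-- here is about the returned movement count.

-- ===== PORT A =====
-- `while h < n // 3: h = 3*h+1`
def growGapA (n3 : Nat) (h : Nat) : Nat :=
  if h < n3 then growGapA n3 (3 * h + 1) else h
  termination_by n3 - h
  decreasing_by omega

-- inner `while j >= h and arreglo[j-h] > temp`: returns (array, final j, number of shifts).
-- `0 < h` is a totality guard only (Python never runs this with h = 0).
def whileA (h : Nat) (temp : Int) (a : List Int) (j : Nat) : List Int × Nat × Nat :=
  if 0 < h ∧ h ≤ j ∧ a.getD (j - h) 0 > temp then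
    let r := whileA h temp (a.set j (a.getD (j - h) 0)) (j - h)
    (r.1, r.2.1, r.2.2 + 1)
  else (a, j, 0)
  termination_by j
  decreasing_by omega

-- body of `for i in range(h, n)`
def stepA (h : Nat) (st : List Int × Int) (i : Nat) : List Int × Int :=
  let temp := st.1.getD i 0
  let r := whileA h temp st.1 i
  (r.1.set r.2.1 temp, st.2 + 1 + (r.2.2 : Int) + 1)

-- `while h > 0`
def outerA (n : Nat) (h : Nat) (st : List Int × Int) : List Int × Int :=
  if h = 0 then st
  else outerA n (h / 3) ((List.range' h (n - h)).foldl (stepA h) st)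
  termination_by h
  decreasing_by omega

def contar_movimientos_shell (arreglo : List Int) : Int :=
  let n := arreglo.length
  (outerA n (growGapA (n / 3) 1) (arreglo, 0)).2

-- ===== PORT B =====
def growGapB (n3 : Nat) (h : Nat) : Nat :=
  if h < n3 then growGapB n3 (3 * h + 1) else h
  termination_by n3 - h
  decreasing_by omega

-- `_msort_count`'s merge loop, as structural recursion over the two sorted halves;
-- the count added when the right head wins is the number of left elements remaining
-- (`len(left) - i` in Source B).
def mergeCnt : List Int → List Int → List Int × Int
  | [], r => (r, 0)
  | x :: l, [] => (x :: l, 0)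
  | x :: l, y :: r =>
    if y < x then
      let p := mergeCnt (x :: l) r
      (y :: p.1, p.2 + ((l.length : Int) + 1))
    else
      let p := mergeCnt l (y :: r)
      (x :: p.1, p.2)
  termination_by l r => l.length + r.length

-- `_msort_count`: merge sort returning (sorted list, inversion count)
def msortCount (a : List Int) : List Int × Int :=
  if a.length ≤ 1 then (a, 0)
  else
    let m := a.length / 2
    let L := msortCount (a.take m)
    let R := msortCount (a.drop m)
    let M := mergeCnt L.1 R.1
    (M.1, L.2 + R.2 + M.2)
  termination_by a.length
  decreasing_by
  · simp only [List.length_take]; omega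
  · simp only [List.length_drop]; omega

-- number of indices start, start+h, start+2h, … below n  (length of arreglo[start::h])
def clsize (n start h : Nat) : Nat := (n - start + h - 1) / h

-- hand port of the extended slice `arreglo[start::h]` (exact for 0 ≤ start, h ≥ 1):
-- the elements at indices start, start+h, start+2h, … below len(arreglo)
def extractB (a : List Int) (start h : Nat) : List Int :=
  (List.range' start (clsize a.length start h) h).map (fun p => a.getD p 0)

-- hand port of the extended-slice assignment `arreglo[start::h] = s` (exact when
-- len(s) equals the slice length, which always holds here — Python raises otherwise)
def scatterB (a : List Int) (start h : Nat) (s : List Int) : List Int :=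
  (List.range a.length).map
    (fun p => if start ≤ p ∧ (p - start) % h = 0 then s.getD ((p - start) / h) 0 else a.getD p 0)

-- body of `for start in range(h)`
def stepBclass (h : Nat) (st : List Int × Int) (start : Nat) : List Int × Int :=
  let r := msortCount (extractB st.1 start h)
  (scatterB st.1 start h r.1, st.2 + r.2)

-- `while h > 0`; `(n - h : Nat)` is exactly Source B's max(0, n-h)
def outerB (n : Nat) (h : Nat) (st : List Int × Int) : List Int × Int :=
  if h = 0 then st
  else outerB n (h / 3) ((List.range h).foldl (stepBclass h) (st.1, st.2 + 2 * ((n - h : Nat) : Int)))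
  termination_by h
  decreasing_by omega

def contar_movimientos_shell_alt (arreglo : List Int) : Int :=
  let n := arreglo.length
  (outerB n (growGapB (n / 3) 1) (arreglo, 0)).2

-- ===== PRECONDITION & SPEC =====
def Spec_contar_movimientos_shell (arreglo : List Int) (out : Int) : Prop := out = contar_movimientos_shell_alt arreglo
instance (arreglo : List Int) (out : Int) : Decidable (Spec_contar_movimientos_shell arreglo out) := by unfold Spec_contar_movimientos_shell; infer_instance

-- ===== CLAIM (what is proved, stated in full; the proofs are below) =====
def Claim_equal_contar_movimientos_shell : Prop := ∀ (arreglo : List Int), Dom_contar_movimientos_shell arreglo → Spec_contar_movimientos_shell arreglo (contar_movimientos_shell arreglo)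

-- ===== LEMMAS AND PROOFS =====

-- ---- proof-side notions: insertion into a sorted list, inversion counts ----

def insL (x : Int) : List Int → List Int
  | [] => [x]
  | y :: ys => if x < y then x :: y :: ys else y :: insL x ys

def sortL (l : List Int) : List Int := l.foldl (fun acc x => insL x acc) []

def cntGt (x : Int) (l : List Int) : Nat := l.countP (fun y => decide (x < y))
def cntLt (x : Int) (l : List Int) : Nat := l.countP (fun y => decide (y < x))

def invN : List Int → Nat
  | [] => 0
  | x :: xs => cntLt x xs + invN xs

def crossN : List Int → List Int → Nat
  | [], _ => 0
  | x :: l, r => cntLt x r + crossN l r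

-- the effect of A's inner while loop + final write, on one residue-class subsequence
def classStep (w : List Int) (k : Nat) : List Int × Nat :=
  let x := w.getD k 0
  let t := whileA 1 x w k
  (t.1.set t.2.1 x, t.2.2)

def cstep (st : List Int × Int) (k : Nat) : List Int × Int :=
  let c := classStep st.1 k
  (c.1, st.2 + 2 + (c.2 : Int))

-- number of indices of residue class r (mod h) processed by `for i in range(h, i0)`
def tcnt (i0 r h : Nat) : Nat := (i0 - r - 1) / h

-- ---- basic facts about clsize / extractB / scatterB ----

theorem clsize_pos_eq (n s h : Nat) (hh : 0 < h) (hs : s < n) :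
    clsize n s h = (n - s - 1) / h + 1 := by
  unfold clsize
  have e : n - s + h - 1 = (n - s - 1) + h := by omega
  rw [e, Nat.add_div_right _ hh]

theorem clsize_zero (n s h : Nat) (hh : 0 < h) (hs : n ≤ s) : clsize n s h = 0 := by
  unfold clsize
  have e : n - s + h - 1 = h - 1 := by omega
  rw [e]
  exact Nat.div_eq_of_lt (by omega)

theorem lt_clsize_iff (n s h m : Nat) (hh : 0 < h) :
    m < clsize n s h ↔ s + m * h < n := by
  by_cases hs : s < n
  · rw [clsize_pos_eq n s h hh hs]
    have h1 : m < (n - s - 1) / h + 1 ↔ m ≤ (n - s - 1) / h := by omega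
    rw [h1, Nat.le_div_iff_mul_le hh]
    have hmh : 0 ≤ m * h := Nat.zero_le _
    omega
  · rw [clsize_zero n s h hh (by omega)]
    have hmh : 0 ≤ m * h := Nat.zero_le _
    omega

theorem length_extractB (a : List Int) (s h : Nat) :
    (extractB a s h).length = clsize a.length s h := by
  simp [extractB]

theorem getD_extractB (a : List Int) (s h m : Nat) (hh : 0 < h) (hm : s + m * h < a.length) :
    (extractB a s h).getD m 0 = a.getD (s + m * h) 0 := by
  have hm' : m < clsize a.length s h := (lt_clsize_iff a.length s h m hh).mpr hm
  have h1 : m < (extractB a s h).length := by rw [length_extractB]; exact hm'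
  rw [List.getD_eq_getElem _ _ h1]
  unfold extractB
  rw [List.getElem_map, List.getElem_range', Nat.mul_comm]

theorem length_scatterB (a : List Int) (s h : Nat) (t : List Int) :
    (scatterB a s h t).length = a.length := by
  simp [scatterB]

theorem getD_scatterB (a : List Int) (s h : Nat) (t : List Int) (p : Nat) (hp : p < a.length) :
    (scatterB a s h t).getD p 0 =
      if s ≤ p ∧ (p - s) % h = 0 then t.getD ((p - s) / h) 0 else a.getD p 0 := by
  have h1 : p < (scatterB a s h t).length := by rw [length_scatterB]; exact hp
  rw [List.getD_eq_getElem _ _ h1]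
  unfold scatterB
  rw [List.getElem_map, List.getElem_range]

theorem extractB_scatterB_same (a : List Int) (r h : Nat) (t : List Int) (hh : 0 < h)
    (hlen : t.length = clsize a.length r h) :
    extractB (scatterB a r h t) r h = t := by
  apply List.ext_getElem
  · rw [length_extractB, length_scatterB, hlen]
  · intro i h1 h2
    rw [length_extractB, length_scatterB] at h1
    have hin : r + i * h < a.length := (lt_clsize_iff a.length r h i hh).mp h1
    rw [← List.getD_eq_getElem _ 0, ← List.getD_eq_getElem _ 0]
    rw [getD_extractB _ _ _ _ hh (by rw [length_scatterB]; exact hin)]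
    rw [getD_scatterB _ _ _ _ _ hin]
    rw [if_pos ⟨Nat.le_add_right _ _, by simp [Nat.mul_mod_left]⟩]
    congr 1
    rw [Nat.add_sub_cancel_left, Nat.mul_div_cancel _ hh]

theorem extractB_scatterB_ne (a : List Int) (r r' h : Nat) (t : List Int) (hh : 0 < h)
    (hr : r < h) (hr' : r' < h) (hne : r' ≠ r) :
    extractB (scatterB a r h t) r' h = extractB a r' h := by
  apply List.ext_getElem
  · rw [length_extractB, length_extractB, length_scatterB]
  · intro i h1 h2
    rw [length_extractB, length_extractB] at *
    rw [length_scatterB] at h1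
    have hin : r' + i * h < a.length := (lt_clsize_iff a.length r' h i hh).mp h1
    rw [← List.getD_eq_getElem _ 0, ← List.getD_eq_getElem _ 0]
    rw [getD_extractB _ _ _ _ hh (by rw [length_scatterB]; exact hin),
        getD_extractB _ _ _ _ hh hin]
    rw [getD_scatterB _ _ _ _ _ hin]
    rw [if_neg]
    rintro ⟨hle, hmod⟩
    have hdvd : h ∣ (r' + i * h - r) := Nat.dvd_of_mod_eq_zero hmod
    obtain ⟨q, hq⟩ := hdvd
    have hp : r' + i * h = r + h * q := by omega
    have h3 : (r' + i * h) % h = r' := by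
      rw [Nat.add_mul_mod_self_right, Nat.mod_eq_of_lt hr']
    have h4 : (r + h * q) % h = r := by
      rw [Nat.add_mul_mod_self_left, Nat.mod_eq_of_lt hr]
    rw [hp, h4] at h3
    exact hne h3.symm

theorem extractB_set_same (a : List Int) (r h m : Nat) (v : Int) (hh : 0 < h)
    (hm : r + m * h < a.length) :
    extractB (a.set (r + m * h) v) r h = (extractB a r h).set m v := by
  apply List.ext_getElem
  · simp [length_extractB]
  · intro i h1 h2
    rw [length_extractB, List.length_set] at h1
    have hin : r + i * h < a.length := (lt_clsize_iff a.length r h i hh).mp h1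
    rw [← List.getD_eq_getElem _ 0, ← List.getD_eq_getElem _ 0]
    rw [getD_extractB _ _ _ _ hh (by simpa using hin)]
    by_cases hmi : m = i
    · subst hmi
      have e1 : (a.set (r + m * h) v).getD (r + m * h) 0 = v := by
        rw [List.getD_eq_getElem _ _ (by simpa using hm), List.getElem_set_self]
      rw [e1]
      have hm' : m < (extractB a r h).length := by
        rw [length_extractB]; exact (lt_clsize_iff a.length r h m hh).mpr hm
      rw [List.getD_eq_getElem _ _ (by simpa using hm'), List.getElem_set_self]
    · have hne : r + m * h ≠ r + i * h := by
        intro he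
        exact hmi (Nat.eq_of_mul_eq_mul_right hh (by omega))
      have e1 : (a.set (r + m * h) v).getD (r + i * h) 0 = a.getD (r + i * h) 0 := by
        rw [List.getD_eq_getElem?_getD, List.getD_eq_getElem?_getD,
            List.getElem?_set_ne hne]
      have e2 : ((extractB a r h).set m v).getD i 0 = (extractB a r h).getD i 0 := by
        rw [List.getD_eq_getElem?_getD, List.getD_eq_getElem?_getD,
            List.getElem?_set_ne hmi]
      rw [e1, e2, getD_extractB _ _ _ _ hh hin]

theorem extractB_set_ne (a : List Int) (r r' h m : Nat) (v : Int) (hh : 0 < h)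
    (hr : r < h) (hr' : r' < h) (hne : r' ≠ r) :
    extractB (a.set (r + m * h) v) r' h = extractB a r' h := by
  apply List.ext_getElem
  · simp [length_extractB]
  · intro i h1 h2
    rw [length_extractB, List.length_set] at h1
    have hin : r' + i * h < a.length := (lt_clsize_iff a.length r' h i hh).mp h1
    rw [← List.getD_eq_getElem _ 0, ← List.getD_eq_getElem _ 0]
    rw [getD_extractB _ _ _ _ hh (by simpa using hin), getD_extractB _ _ _ _ hh hin]
    have hnep : r + m * h ≠ r' + i * h := by
      intro he
      have h3 : (r' + i * h) % h = r' := by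
        rw [Nat.add_mul_mod_self_right, Nat.mod_eq_of_lt hr']
      have h4 : (r + m * h) % h = r := by
        rw [Nat.add_mul_mod_self_right, Nat.mod_eq_of_lt hr]
      rw [he] at h4
      rw [h4] at h3
      exact hne h3.symm
    rw [List.getD_eq_getElem?_getD, List.getD_eq_getElem?_getD,
        List.getElem?_set_ne hnep]

theorem eq_of_extractB (a b : List Int) (h : Nat) (hh : 0 < h)
    (hlen : a.length = b.length)
    (he : ∀ r < h, extractB a r h = extractB b r h) : a = b := by
  apply List.ext_getElem hlen
  intro p h1 h2
  have hp : p % h + p / h * h = p := Nat.mod_add_div' p h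
  have hr : p % h < h := Nat.mod_lt _ hh
  have h3 := he (p % h) hr
  have h4 := congrArg (fun l => l.getD (p / h) 0) h3
  simp only at h4
  rw [getD_extractB _ _ _ _ hh (by omega), getD_extractB _ _ _ _ hh (by omega)] at h4
  rw [hp] at h4
  rw [← List.getD_eq_getElem _ 0, ← List.getD_eq_getElem _ 0]
  exact h4

-- ---- insL / sortL / inversion-count facts ----

theorem insL_perm (x : Int) (s : List Int) : (insL x s).Perm (x :: s) := by
  induction s with
  | nil => simp [insL]
  | cons y ys ih =>
    simp only [insL]
    split_ifs
    · exact List.Perm.refl _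
    · exact (ih.cons y).trans (List.Perm.swap x y ys)

theorem insL_pairwise (x : Int) (s : List Int)
    (hs : s.Pairwise (fun a b : Int => a ≤ b)) :
    (insL x s).Pairwise (fun a b : Int => a ≤ b) := by
  induction s with
  | nil => simp [insL]
  | cons y ys ih =>
    rw [List.pairwise_cons] at hs
    simp only [insL]
    split_ifs with hx
    · rw [List.pairwise_cons]
      refine ⟨?_, List.pairwise_cons.mpr hs⟩
      intro b hb
      rcases List.mem_cons.mp hb with hb | hb
      · omega
      · have := hs.1 b hb; omega
    · rw [List.pairwise_cons]
      refine ⟨?_, ih hs.2⟩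
      intro b hb
      have hb' : b ∈ x :: ys := (insL_perm x ys).mem_iff.mp hb
      rcases List.mem_cons.mp hb' with hb' | hb'
      · omega
      · exact hs.1 b hb'

theorem insL_append_of_lt (x y : Int) (s : List Int) (hxy : x < y) :
    insL x (s ++ [y]) = insL x s ++ [y] := by
  induction s with
  | nil => simp [insL, hxy]
  | cons z s ih =>
    simp only [List.cons_append, insL]
    split_ifs
    · simp
    · simp [ih]

theorem insL_of_all_le (x : Int) (s : List Int) (hall : ∀ a ∈ s, ¬ x < a) :
    insL x s = s ++ [x] := by
  induction s with
  | nil => simp [insL]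
  | cons y ys ih =>
    simp only [insL]
    rw [if_neg (hall y (List.mem_cons_self))]
    simp [ih (fun a ha => hall a (List.mem_cons_of_mem _ ha))]

theorem sortL_perm (l : List Int) : (sortL l).Perm l := by
  have aux : ∀ (l acc : List Int), (l.foldl (fun acc x => insL x acc) acc).Perm (l ++ acc) := by
    intro l
    induction l with
    | nil => simp
    | cons x l ih =>
      intro acc
      simp only [List.foldl_cons]
      refine (ih (insL x acc)).trans ?_
      refine ((List.Perm.append_left l (insL_perm x acc)).trans ?_)
      exact List.perm_middle
  simpa using aux l []

theorem sortL_pairwise (l : List Int) : (sortL l).Pairwise (fun a b : Int => a ≤ b) := by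
  have aux : ∀ (l acc : List Int), acc.Pairwise (fun a b : Int => a ≤ b) →
      (l.foldl (fun acc x => insL x acc) acc).Pairwise (fun a b : Int => a ≤ b) := by
    intro l
    induction l with
    | nil => intro acc h; simpa using h
    | cons x l ih =>
      intro acc h
      simp only [List.foldl_cons]
      exact ih _ (insL_pairwise x acc h)
  exact aux l [] (by simp)

theorem sortL_length (l : List Int) : (sortL l).length = l.length := by
  exact (sortL_perm l).length_eq

theorem sortL_append_singleton (l : List Int) (x : Int) :
    sortL (l ++ [x]) = insL x (sortL l) := by
  simp [sortL, List.foldl_append]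

theorem sortL_short (l : List Int) (hl : l.length ≤ 1) : sortL l = l := by
  cases l with
  | nil => rfl
  | cons x xs =>
    cases xs with
    | nil => rfl
    | cons y ys => simp only [List.length_cons] at hl; omega

theorem invN_short (l : List Int) (hl : l.length ≤ 1) : invN l = 0 := by
  cases l with
  | nil => rfl
  | cons x xs =>
    cases xs with
    | nil => simp [invN, cntLt]
    | cons y ys => simp only [List.length_cons] at hl; omega

theorem invN_append_singleton (l : List Int) (x : Int) :
    invN (l ++ [x]) = invN l + cntGt x l := by
  induction l with
  | nil => simp [invN, cntLt, cntGt]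
  | cons y l ih =>
    simp only [List.cons_append, invN, cntLt, cntGt, List.countP_append,
      List.countP_cons, List.countP_nil, ih]
    omega

theorem invN_append (A B : List Int) : invN (A ++ B) = invN A + invN B + crossN A B := by
  induction A with
  | nil => simp [invN, crossN]
  | cons a A ih =>
    simp only [List.cons_append, invN, crossN, cntLt, List.countP_append, ih]
    omega

theorem crossN_nil_right (A : List Int) : crossN A [] = 0 := by
  induction A with
  | nil => rfl
  | cons a A ih => simp [crossN, cntLt, ih]

theorem crossN_cons_right_of_lt (A R : List Int) (y : Int) (hy : ∀ a ∈ A, y < a) :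
    crossN A (y :: R) = A.length + crossN A R := by
  induction A with
  | nil => simp [crossN]
  | cons a A ih =>
    have hya : y < a := hy a List.mem_cons_self
    have h1 : cntLt a (y :: R) = cntLt a R + 1 := by
      simp [cntLt, List.countP_cons, hya]
    simp only [crossN, List.length_cons]
    rw [h1, ih (fun b hb => hy b (List.mem_cons_of_mem _ hb))]
    omega

theorem crossN_eq_sum (A B : List Int) : crossN A B = (A.map (fun a => cntLt a B)).sum := by
  induction A with
  | nil => rfl
  | cons a A ih => simp [crossN, ih]

theorem crossN_perm (A A' B B' : List Int) (hA : A.Perm A') (hB : B.Perm B') :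
    crossN A B = crossN A' B' := by
  rw [crossN_eq_sum, crossN_eq_sum]
  have h1 : A.map (fun a => cntLt a B) = A.map (fun a => cntLt a B') := by
    apply List.map_congr_left
    intro a _
    exact hB.countP_eq _
  rw [h1]
  exact (hA.map _).sum_eq

-- ---- merge sort returns (sorted, inversions) ----

theorem mergeCnt_perm (L R : List Int) : (mergeCnt L R).1.Perm (L ++ R) := by
  fun_induction mergeCnt with
  | case1 r => simp
  | case2 x l => simp
  | case3 x l y r hlt p ih =>
    simp only [mergeCnt, if_pos hlt]
    exact (ih.cons y).trans List.perm_middle.symm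
  | case4 x l y r hlt p ih =>
    simp only [mergeCnt, if_neg hlt]
    exact ih.cons x

theorem mergeCnt_pairwise (L R : List Int)
    (hL : L.Pairwise (fun a b : Int => a ≤ b)) (hR : R.Pairwise (fun a b : Int => a ≤ b)) :
    (mergeCnt L R).1.Pairwise (fun a b : Int => a ≤ b) := by
  fun_induction mergeCnt with
  | case1 r => simpa using hR
  | case2 x l => simpa using hL
  | case3 x l y r hlt p ih =>
    rw [List.pairwise_cons] at hR
    simp only [mergeCnt, if_pos hlt]
    rw [List.pairwise_cons]
    refine ⟨?_, ih hL hR.2⟩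
    intro b hb
    have hb' : b ∈ (x :: l) ++ r := (mergeCnt_perm _ _).mem_iff.mp hb
    rw [List.pairwise_cons] at hL
    rcases List.mem_append.mp hb' with hb' | hb'
    · rcases List.mem_cons.mp hb' with hb' | hb'
      · omega
      · have := hL.1 b hb'; omega
    · exact hR.1 b hb'
  | case4 x l y r hlt p ih =>
    rw [List.pairwise_cons] at hL
    simp only [mergeCnt, if_neg hlt]
    rw [List.pairwise_cons]
    refine ⟨?_, ih hL.2 hR⟩
    intro b hb
    have hb' : b ∈ l ++ (y :: r) := (mergeCnt_perm _ _).mem_iff.mp hb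
    rw [List.pairwise_cons] at hR
    rcases List.mem_append.mp hb' with hb' | hb'
    · exact hL.1 b hb'
    · rcases List.mem_cons.mp hb' with hb' | hb'
      · omega
      · have := hR.1 b hb'; omega

theorem mergeCnt_cnt (L R : List Int)
    (hL : L.Pairwise (fun a b : Int => a ≤ b)) (hR : R.Pairwise (fun a b : Int => a ≤ b)) :
    (mergeCnt L R).2 = (crossN L R : Int) := by
  fun_induction mergeCnt with
  | case1 r => simp [crossN]
  | case2 x l => simp [mergeCnt, crossN_nil_right]
  | case3 x l y r hlt p ih =>
    rw [List.pairwise_cons] at hR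
    simp only [mergeCnt, if_pos hlt]
    rw [ih hL hR.2]
    rw [List.pairwise_cons] at hL
    have hy : ∀ a ∈ x :: l, y < a := by
      intro a ha
      rcases List.mem_cons.mp ha with ha | ha
      · omega
      · have := hL.1 a ha; omega
    rw [crossN_cons_right_of_lt _ _ _ hy]
    simp only [List.length_cons]
    push_cast
    ring
  | case4 x l y r hlt p ih =>
    rw [List.pairwise_cons] at hL
    simp only [mergeCnt, if_neg hlt]
    rw [ih hL.2 hR]
    have h0 : cntLt x (y :: r) = 0 := by
      rw [List.pairwise_cons] at hR
      unfold cntLt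
      rw [List.countP_eq_zero]
      intro b hb
      rcases List.mem_cons.mp hb with hb | hb
      · simp; omega
      · have := hR.1 b hb; simp; omega
    simp only [crossN, h0]
    push_cast
    ring

theorem sorted_perm_eq (l₁ l₂ : List Int) (hp : l₁.Perm l₂)
    (h₁ : l₁.Pairwise (fun a b : Int => a ≤ b)) (h₂ : l₂.Pairwise (fun a b : Int => a ≤ b)) :
    l₁ = l₂ := by
  exact hp.eq_of_pairwise (fun a b _ _ h1 h2 => le_antisymm h1 h2) h₁ h₂

theorem msortCount_eq (l : List Int) : msortCount l = (sortL l, (invN l : Int)) := by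
  have H : ∀ n (l : List Int), l.length ≤ n → msortCount l = (sortL l, (invN l : Int)) := by
    intro n
    induction n with
    | zero =>
      intro l hl
      rw [msortCount, if_pos (by omega), sortL_short l (by omega), invN_short l (by omega)]
      simp
    | succ n ih =>
      intro l hl
      by_cases h1 : l.length ≤ 1
      · rw [msortCount, if_pos h1, sortL_short l h1, invN_short l h1]; simp
      · rw [msortCount, if_neg h1]
        have e1 := ih (l.take (l.length / 2)) (by simp; omega)
        have e2 := ih (l.drop (l.length / 2)) (by simp; omega)
        simp only [e1, e2]
        have hp := List.take_append_drop (l.length / 2) l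
        have hmg1 : (mergeCnt (sortL (l.take (l.length / 2))) (sortL (l.drop (l.length / 2)))).1
            = sortL l := by
          apply sorted_perm_eq
          · refine (mergeCnt_perm _ _).trans ?_
            refine ((sortL_perm _).append (sortL_perm _)).trans ?_
            rw [hp]
            exact (sortL_perm l).symm
          · exact mergeCnt_pairwise _ _ (sortL_pairwise _) (sortL_pairwise _)
          · exact sortL_pairwise l
        have hmg2 : (mergeCnt (sortL (l.take (l.length / 2))) (sortL (l.drop (l.length / 2)))).2
            = (crossN (l.take (l.length / 2)) (l.drop (l.length / 2)) : Int) := by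
          rw [mergeCnt_cnt _ _ (sortL_pairwise _) (sortL_pairwise _)]
          exact congrArg _ (crossN_perm _ _ _ _ (sortL_perm _) (sortL_perm _))
        rw [hmg1, hmg2]
        have h3 : invN (l.take (l.length / 2)) + invN (l.drop (l.length / 2))
            + crossN (l.take (l.length / 2)) (l.drop (l.length / 2)) = invN l := by
          rw [← invN_append, hp]
        rw [Prod.mk.injEq]
        refine ⟨rfl, ?_⟩
        rw [← h3]
        push_cast
        ring
  exact H l.length l le_rfl

-- ---- the inner while loop acts as sorted insertion on the class subsequence ----

theorem whileA_true (h : Nat) (temp : Int) (a : List Int) (j : Nat)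
    (hc : 0 < h ∧ h ≤ j ∧ a.getD (j - h) 0 > temp) :
    whileA h temp a j
      = ((whileA h temp (a.set j (a.getD (j - h) 0)) (j - h)).1,
         (whileA h temp (a.set j (a.getD (j - h) 0)) (j - h)).2.1,
         (whileA h temp (a.set j (a.getD (j - h) 0)) (j - h)).2.2 + 1) := by
  rw [whileA, if_pos hc]

theorem whileA_false (h : Nat) (temp : Int) (a : List Int) (j : Nat)
    (hc : ¬(0 < h ∧ h ≤ j ∧ a.getD (j - h) 0 > temp)) :
    whileA h temp a j = (a, j, 0) := by
  rw [whileA, if_neg hc]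

theorem whileA_one_j_le (x : Int) (w : List Int) (k : Nat) : (whileA 1 x w k).2.1 ≤ k := by
  induction k using Nat.strong_induction_on generalizing w with
  | _ k ih =>
    rw [whileA]
    split_ifs with hc
    · dsimp only
      have := ih (k - 1) (by omega) (w.set k (w.getD (k - 1) 0))
      omega
    · simp

theorem getD_append_len (s d : List Int) (z : Int) (j : Nat) (hj : j = s.length) :
    (s ++ z :: d).getD j 0 = z := by
  subst hj
  have h1 : (s ++ z :: d).getD s.length 0 = (z :: d).getD 0 0 := by
    rw [List.getD_eq_getElem?_getD, List.getD_eq_getElem?_getD,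
        List.getElem?_append_right (le_refl _), Nat.sub_self]
  simpa using h1

theorem set_append_len (s d : List Int) (z x : Int) (j : Nat) (hj : j = s.length) :
    (s ++ z :: d).set j x = s ++ x :: d := by
  subst hj
  induction s with
  | nil => rfl
  | cons a s ih => simp [ih]

theorem whileA_one (x : Int) (s : List Int)
    (hs : s.Pairwise (fun a b : Int => a ≤ b)) :
    ∀ (z : Int) (d : List Int),
      (whileA 1 x (s ++ z :: d) s.length).1.set (whileA 1 x (s ++ z :: d) s.length).2.1 x
          = insL x s ++ d
      ∧ (whileA 1 x (s ++ z :: d) s.length).2.2 = cntGt x s := by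
  revert hs
  induction s using List.reverseRecOn with
  | nil =>
    intro _ z d
    rw [whileA_false _ _ _ _ (by rintro ⟨-, h2, -⟩; simp at h2)]
    exact ⟨by simp [insL], by simp [cntGt]⟩
  | append_singleton s₀ y ih =>
    intro hs2 z d
    have hps := List.pairwise_append.mp hs2
    have hs₀ : s₀.Pairwise (fun a b : Int => a ≤ b) := hps.1
    have hcross : ∀ a ∈ s₀, a ≤ y := fun a ha => hps.2.2 a ha y (by simp)
    have hlen : (s₀ ++ [y]).length = s₀.length + 1 := by simp
    rw [hlen]
    have hW : (s₀ ++ [y]) ++ z :: d = s₀ ++ y :: z :: d := by simp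
    have hread : ((s₀ ++ [y]) ++ z :: d).getD (s₀.length + 1 - 1) 0 = y := by
      rw [hW]; exact getD_append_len _ _ _ _ (by omega)
    by_cases hxy : x < y
    · rw [whileA_true 1 x ((s₀ ++ [y]) ++ z :: d) (s₀.length + 1)
          ⟨Nat.one_pos, by omega, by rw [hread]; exact hxy⟩]
      dsimp only
      have hset : ((s₀ ++ [y]) ++ z :: d).set (s₀.length + 1)
          (((s₀ ++ [y]) ++ z :: d).getD (s₀.length + 1 - 1) 0) = s₀ ++ y :: (y :: d) := by
        rw [hread, set_append_len (s₀ ++ [y]) d z y (s₀.length + 1) (by simp)]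
        simp
      rw [hset]
      simp only [Nat.add_sub_cancel]
      obtain ⟨ih1, ih2⟩ := ih hs₀ y (y :: d)
      constructor
      · rw [ih1, insL_append_of_lt x y s₀ hxy]
        simp
      · rw [ih2]
        unfold cntGt
        rw [List.countP_append]
        simp [hxy]
    · rw [whileA_false 1 x ((s₀ ++ [y]) ++ z :: d) (s₀.length + 1)
          (by rintro ⟨-, -, hgt⟩; rw [hread] at hgt; exact hxy hgt)]
      constructor
      · rw [set_append_len (s₀ ++ [y]) d z x _ (by simp)]
        rw [insL_of_all_le x (s₀ ++ [y]) ?_]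
        · simp
        · intro a ha
          rcases List.mem_append.mp ha with ha | ha
          · have h1 := hcross a ha; omega
          · simp at ha; omega
      · symm
        unfold cntGt
        rw [List.countP_eq_zero]
        intro b hb
        rcases List.mem_append.mp hb with hb | hb
        · have h1 := hcross b hb; simp; omega
        · simp at hb; simp; omega

-- ---- the gapped while loop simulates the h=1 loop on the extracted class ----

theorem whileA_sim (h : Nat) (hh : 0 < h) (r : Nat) (hr : r < h) (x : Int) :
    ∀ (k : Nat) (a : List Int), r + k * h < a.length →
      (whileA h x a (r + k * h)).2.2 = (whileA 1 x (extractB a r h) k).2.2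
      ∧ (whileA h x a (r + k * h)).2.1 = r + (whileA 1 x (extractB a r h) k).2.1 * h
      ∧ (whileA h x a (r + k * h)).1.length = a.length
      ∧ extractB (whileA h x a (r + k * h)).1 r h = (whileA 1 x (extractB a r h) k).1
      ∧ (∀ r' < h, r' ≠ r → extractB (whileA h x a (r + k * h)).1 r' h = extractB a r' h) := by
  intro k
  induction k using Nat.strong_induction_on with
  | _ k ih =>
    intro a hin
    rcases Nat.eq_zero_or_pos k with hk0 | hk1
    · subst hk0
      rw [whileA_false h x a (r + 0 * h) (by rintro ⟨-, h2, -⟩; omega),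
          whileA_false 1 x (extractB a r h) 0 (by rintro ⟨-, h2, -⟩; omega)]
      exact ⟨rfl, rfl, rfl, rfl, fun _ _ _ => rfl⟩
    · have hmul : (k - 1) * h ≤ k * h := Nat.mul_le_mul_right h (by omega)
      have hkh : h ≤ k * h := by
        have := Nat.mul_le_mul_right h hk1
        omega
      have hkm : r + (k - 1) * h < a.length := by omega
      have hidx : r + k * h - h = r + (k - 1) * h := by
        have e : (k - 1) * h + h = k * h := by
          rw [← Nat.succ_mul]
          congr 1
          omega
        omega
      have hread : a.getD (r + k * h - h) 0 = (extractB a r h).getD (k - 1) 0 := by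
        rw [hidx, getD_extractB a r h (k - 1) hh hkm]
      have hread2 : a.getD (r + (k - 1) * h) 0 = (extractB a r h).getD (k - 1) 0 :=
        (getD_extractB a r h (k - 1) hh hkm).symm
      by_cases hcond : x < (extractB a r h).getD (k - 1) 0
      · rw [whileA_true h x a (r + k * h) ⟨hh, by omega, by rw [hread]; exact hcond⟩,
            whileA_true 1 x (extractB a r h) k ⟨Nat.one_pos, hk1, hcond⟩]
        dsimp only
        rw [hidx, hread2]
        set A1 := a.set (r + k * h) ((extractB a r h).getD (k - 1) 0) with hA1
        have hlenA1 : A1.length = a.length := by simp [hA1]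
        have hextr : extractB A1 r h
            = (extractB a r h).set k ((extractB a r h).getD (k - 1) 0) := by
          rw [hA1, extractB_set_same a r h k _ hh hin]
        have hrec := ih (k - 1) (by omega) A1 (by rw [hlenA1]; exact hkm)
        obtain ⟨c1, c2, c3, c4, c5⟩ := hrec
        rw [← hextr]
        refine ⟨by rw [c1], by rw [c2], by rw [c3, hlenA1], c4, ?_⟩
        intro r' h1 h2
        rw [c5 r' h1 h2, hA1, extractB_set_ne a r r' h k _ hh hr h1 h2]
      · rw [whileA_false h x a (r + k * h)
              (by rintro ⟨-, -, hgt⟩; rw [hread] at hgt; exact hcond hgt),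
            whileA_false 1 x (extractB a r h) k
              (by rintro ⟨-, -, hgt⟩; exact hcond hgt)]
        exact ⟨rfl, rfl, rfl, rfl, fun _ _ _ => rfl⟩

theorem stepA_sim (h : Nat) (hh : 0 < h) (r k : Nat) (hr : r < h) (a : List Int) (mov : Int)
    (hin : r + k * h < a.length) :
    (stepA h (a, mov) (r + k * h)).1.length = a.length
    ∧ extractB (stepA h (a, mov) (r + k * h)).1 r h = (classStep (extractB a r h) k).1
    ∧ (∀ r' < h, r' ≠ r → extractB (stepA h (a, mov) (r + k * h)).1 r' h = extractB a r' h)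
    ∧ (stepA h (a, mov) (r + k * h)).2 = mov + 2 + ((classStep (extractB a r h) k).2 : Int) := by
  have hx : a.getD (r + k * h) 0 = (extractB a r h).getD k 0 :=
    (getD_extractB a r h k hh hin).symm
  obtain ⟨c1, c2, c3, c4, c5⟩ :=
    whileA_sim h hh r hr ((extractB a r h).getD k 0) k a hin
  have hjle : (whileA 1 ((extractB a r h).getD k 0) (extractB a r h) k).2.1 ≤ k :=
    whileA_one_j_le _ _ _
  have hjin : r + (whileA 1 ((extractB a r h).getD k 0) (extractB a r h) k).2.1 * h
      < a.length := by
    have := Nat.mul_le_mul_right h hjle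
    omega
  dsimp only [stepA]
  rw [hx]
  refine ⟨?_, ?_, ?_, ?_⟩
  · rw [List.length_set, c3]
  · rw [c2, extractB_set_same _ r h _ _ hh (by rw [c3]; exact hjin), c4]
    dsimp only [classStep]
  · intro r' h1 h2
    rw [c2, extractB_set_ne _ r r' h _ _ hh hr h1 h2, c5 r' h1 h2]
  · rw [c1]
    dsimp only [classStep]
    ring

-- ---- the per-class run is insertion sort with inversion counting ----

theorem classRun_inv (v : List Int) :
    ∀ t : Nat, t + 1 ≤ v.length →
      (List.range' 1 t).foldl cstep (v, 0)
        = (sortL (v.take (t + 1)) ++ v.drop (t + 1),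
           ((invN (v.take (t + 1)) + 2 * t : Nat) : Int)) := by
  intro t
  induction t with
  | zero =>
    intro h1
    cases v with
    | nil => simp at h1
    | cons x xs => simp [sortL, insL, invN, cntLt]
  | succ t ih =>
    intro h2
    rw [List.range'_concat, List.foldl_append, List.foldl_cons, List.foldl_nil]
    simp only [one_mul]
    rw [ih (by omega)]
    set S := sortL (v.take (t + 1)) with hS
    have hlenS : S.length = t + 1 := by
      rw [hS, sortL_length]
      simp [List.length_take]
      omega
    have hTlt : t + 1 < v.length := by omega
    have hdrop : v.drop (t + 1) = v[t + 1] :: v.drop (t + 2) :=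
      List.drop_eq_getElem_cons hTlt
    have htake : v.take (t + 2) = v.take (t + 1) ++ [v[t + 1]] := by
      rw [List.take_succ]
      simp [List.getElem?_eq_getElem hTlt]
    dsimp only [cstep, classStep]
    have hx : (S ++ v.drop (t + 1)).getD (1 + t) 0 = v[t + 1] := by
      rw [hdrop]; exact getD_append_len _ _ _ _ (by omega)
    rw [hx, hdrop]
    have hj : 1 + t = S.length := by omega
    rw [hj]
    obtain ⟨w1, w2⟩ := whileA_one (v[t + 1]) S (by rw [hS]; exact sortL_pairwise _)
      (v[t + 1]) (v.drop (t + 2))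
    rw [Prod.mk.injEq]
    refine ⟨?_, ?_⟩
    · rw [w1]
      congr 1
      rw [hS, ← sortL_append_singleton, ← htake]
    · rw [w2]
      have hcnt : cntGt (v[t + 1]) S = cntGt (v[t + 1]) (v.take (t + 1)) := by
        rw [hS]; unfold cntGt; exact (sortL_perm _).countP_eq _
      have hinv : invN (v.take (t + 2))
          = invN (v.take (t + 1)) + cntGt (v[t + 1]) (v.take (t + 1)) := by
        rw [htake, invN_append_singleton]
      rw [hcnt, hinv]
      push_cast
      ring

theorem classRun_eq (v : List Int) :
    (List.range' 1 (v.length - 1)).foldl cstep (v, 0)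
      = (sortL v, ((invN v + 2 * (v.length - 1) : Nat) : Int)) := by
  cases v with
  | nil => simp [sortL]
  | cons x xs =>
    have h1 := classRun_inv (x :: xs) ((x :: xs).length - 1) (by simp)
    rw [show (x :: xs).length - 1 + 1 = (x :: xs).length from by simp] at h1
    rw [List.take_length, List.drop_length] at h1
    simpa using h1

-- ---- tcnt bookkeeping ----

theorem tcnt_h (r h : Nat) (hr : r < h) : tcnt h r h = 0 := by
  unfold tcnt
  exact Nat.div_eq_of_lt (by omega)

theorem tcnt_succ (i r h : Nat) (hh : 0 < h) (hr : r < h) (hi : h ≤ i) :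
    tcnt (i + 1) r h = tcnt i r h + if r = i % h then 1 else 0 := by
  have hq1 : 1 ≤ i / h := (Nat.one_le_div_iff hh).mpr hi
  have hdm : h * (i / h) + i % h = i := Nat.div_add_mod i h
  have hr0h : i % h < h := Nat.mod_lt _ hh
  have aux : h * (i / h - 1) + h = h * (i / h) := by
    rw [← Nat.mul_succ]
    congr 1
    omega
  have hsub : i - i % h = h * (i / h) := Nat.sub_eq_of_eq_add hdm.symm
  by_cases hrr : r = i % h
  · rw [if_pos hrr]
    have e1 : i + 1 - r - 1 = h * (i / h) := by
      rw [show i + 1 - r - 1 = i - r from by omega, hrr, hsub]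
    have e2 : i - r - 1 = h * (i / h - 1) + (h - 1) := by
      rw [show i - r - 1 = i - r - 1 from rfl, hrr,
          show i - i % h - 1 = i - i % h - 1 from rfl]
      rw [show i - i % h - 1 = h * (i / h) - 1 from by rw [hsub]]
      rw [← aux, Nat.add_sub_assoc hh]
    unfold tcnt
    rw [e1, e2, Nat.mul_div_cancel_left _ hh, Nat.mul_add_div hh,
        Nat.div_eq_of_lt (show h - 1 < h by omega)]
    omega
  · rw [if_neg hrr]
    rcases Nat.lt_or_ge r (i % h) with hc | hc
    · have e0 : i = (h * (i / h) + (i % h - r)) + r := by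
        calc i = h * (i / h) + i % h := hdm.symm
          _ = h * (i / h) + ((i % h - r) + r) := by rw [show (i % h - r) + r = i % h from by omega]
          _ = (h * (i / h) + (i % h - r)) + r := by rw [Nat.add_assoc]
      have eA : i - r = h * (i / h) + (i % h - r) := Nat.sub_eq_of_eq_add e0
      have e1 : i + 1 - r - 1 = h * (i / h) + (i % h - r) := by
        rw [show i + 1 - r - 1 = i - r from by omega, eA]
      have e2 : i - r - 1 = h * (i / h) + (i % h - r - 1) := by
        rw [show i - r - 1 = (i - r) - 1 from rfl, eA,
            Nat.add_sub_assoc (by omega : 1 ≤ i % h - r)]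
      unfold tcnt
      rw [e1, e2, Nat.mul_add_div hh, Nat.mul_add_div hh,
          Nat.div_eq_of_lt (show i % h - r < h by omega),
          Nat.div_eq_of_lt (show i % h - r - 1 < h by omega)]
    · have hc' : i % h < r := by omega
      have e0 : i = (h * (i / h - 1) + (h + i % h - r)) + r := by
        calc i = h * (i / h) + i % h := hdm.symm
          _ = (h * (i / h - 1) + h) + i % h := by rw [aux]
          _ = h * (i / h - 1) + (h + i % h) := by rw [Nat.add_assoc]
          _ = h * (i / h - 1) + ((h + i % h - r) + r) := by
              rw [show (h + i % h - r) + r = h + i % h from by omega]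
          _ = (h * (i / h - 1) + (h + i % h - r)) + r := by rw [Nat.add_assoc]
      have eA : i - r = h * (i / h - 1) + (h + i % h - r) := Nat.sub_eq_of_eq_add e0
      have e1 : i + 1 - r - 1 = h * (i / h - 1) + (h + i % h - r) := by
        rw [show i + 1 - r - 1 = i - r from by omega, eA]
      have e2 : i - r - 1 = h * (i / h - 1) + (h + i % h - r - 1) := by
        rw [show i - r - 1 = (i - r) - 1 from rfl, eA,
            Nat.add_sub_assoc (by omega : 1 ≤ h + i % h - r)]
      unfold tcnt
      rw [e1, e2, Nat.mul_add_div hh, Nat.mul_add_div hh,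
          Nat.div_eq_of_lt (show h + i % h - r < h by omega),
          Nat.div_eq_of_lt (show h + i % h - r - 1 < h by omega)]

theorem tcnt_div (i h : Nat) (hh : 0 < h) (hi : h ≤ i) :
    tcnt i (i % h) h = i / h - 1 := by
  have hq1 : 1 ≤ i / h := (Nat.one_le_div_iff hh).mpr hi
  have hdm : h * (i / h) + i % h = i := Nat.div_add_mod i h
  have aux : h * (i / h - 1) + h = h * (i / h) := by
    rw [← Nat.mul_succ]
    congr 1
    omega
  have hsub : i - i % h = h * (i / h) := Nat.sub_eq_of_eq_add hdm.symm
  have e2 : i - i % h - 1 = h * (i / h - 1) + (h - 1) := by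
    rw [show i - i % h - 1 = (i - i % h) - 1 from rfl, hsub, ← aux, Nat.add_sub_assoc hh]
  unfold tcnt
  rw [e2, Nat.mul_add_div hh, Nat.div_eq_of_lt (show h - 1 < h by omega)]
  omega

theorem tcnt_clsize (n r h : Nat) (hh : 0 < h) : tcnt n r h = clsize n r h - 1 := by
  rcases Nat.lt_or_ge r n with hrn | hrn
  · rw [clsize_pos_eq n r h hh hrn]
    unfold tcnt
    rw [Nat.add_sub_cancel]
  · rw [clsize_zero n r h hh hrn]
    unfold tcnt
    rw [show n - r - 1 = 0 from by omega]
    simp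

theorem sum_tcnt (n h : Nat) (hh : 0 < h) :
    ∑ r ∈ Finset.range h, tcnt n r h = n - h := by
  rcases Nat.lt_or_ge n h with hnh | hhn
  · have hz : ∀ r ∈ Finset.range h, tcnt n r h = 0 := by
      intro r hr
      unfold tcnt
      exact Nat.div_eq_of_lt (by omega)
    rw [Finset.sum_congr rfl hz]
    simp
    omega
  · obtain ⟨d, rfl⟩ : ∃ d, n = h + d := ⟨n - h, by omega⟩
    clear hhn
    induction d with
    | zero =>
      have hz : ∀ r ∈ Finset.range h, tcnt (h + 0) r h = 0 := fun r hr =>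
        tcnt_h r h (Finset.mem_range.mp hr)
      rw [Finset.sum_congr rfl hz]
      simp
    | succ d ihd =>
      have hstep : ∀ r ∈ Finset.range h, tcnt (h + (d + 1)) r h
          = tcnt (h + d) r h + if r = (h + d) % h then 1 else 0 := by
        intro r hr
        rw [show h + (d + 1) = (h + d) + 1 from rfl]
        exact tcnt_succ (h + d) r h hh (Finset.mem_range.mp hr) (by omega)
      rw [Finset.sum_congr rfl hstep, Finset.sum_add_distrib, ihd]
      rw [Finset.sum_ite_eq' (Finset.range h) ((h + d) % h) (fun _ => 1)]
      rw [if_pos (Finset.mem_range.mpr (Nat.mod_lt _ hh))]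
      omega

-- ---- pass-level: A's i-loop = per-class runs ----

theorem passA_inv (h : Nat) (hh : 0 < h) (a : List Int) (mov : Int) :
    ∀ d : Nat, h + d ≤ a.length →
      ((List.range' h d).foldl (stepA h) (a, mov)).1.length = a.length
      ∧ (∀ r < h, extractB ((List.range' h d).foldl (stepA h) (a, mov)).1 r h
            = ((List.range' 1 (tcnt (h + d) r h)).foldl cstep (extractB a r h, 0)).1)
      ∧ ((List.range' h d).foldl (stepA h) (a, mov)).2
          = mov + ∑ r ∈ Finset.range h,
              ((List.range' 1 (tcnt (h + d) r h)).foldl cstep (extractB a r h, 0)).2 := by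
  intro d
  induction d with
  | zero =>
    intro hd
    refine ⟨rfl, ?_, ?_⟩
    · intro r hr
      rw [show h + 0 = h from rfl, tcnt_h r h hr]
      rfl
    · have hz : ∀ r ∈ Finset.range h,
          ((List.range' 1 (tcnt (h + 0) r h)).foldl cstep (extractB a r h, 0)).2 = 0 := by
        intro r hr
        rw [show h + 0 = h from rfl, tcnt_h r h (Finset.mem_range.mp hr)]
        rfl
      rw [Finset.sum_congr rfl hz]
      simp
  | succ d ihd =>
    intro hd
    rw [show h + (d + 1) = h + d + 1 from rfl] at hd ⊢
    obtain ⟨p1, p2, p3⟩ := ihd (by omega)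
    set r0 := (h + d) % h with hr0
    set k0 := (h + d) / h with hk0
    have hi : h ≤ h + d := by omega
    have hr0h : r0 < h := Nat.mod_lt _ hh
    have hk01 : 1 ≤ k0 := (Nat.one_le_div_iff hh).mpr hi
    have hdm : r0 + k0 * h = h + d := Nat.mod_add_div' (h + d) h
    have hsplit : ∀ w : List Int,
        (List.range' 1 (tcnt (h + d + 1) r0 h)).foldl cstep (w, 0)
        = cstep ((List.range' 1 (tcnt (h + d) r0 h)).foldl cstep (w, 0)) k0 := by
      intro w
      have ht : tcnt (h + d) r0 h = k0 - 1 := tcnt_div (h + d) h hh hi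
      have ht1 : tcnt (h + d + 1) r0 h = tcnt (h + d) r0 h + 1 := by
        rw [tcnt_succ (h + d) r0 h hh hr0h hi, if_pos rfl]
      rw [ht1, ht, List.range'_concat]
      simp only [one_mul]
      rw [show 1 + (k0 - 1) = k0 from by omega, List.foldl_append, List.foldl_cons,
          List.foldl_nil]
    rcases hFeq : (List.range' h d).foldl (stepA h) (a, mov) with ⟨Fa, Fm⟩
    rw [hFeq] at p1 p2 p3
    dsimp only at p1 p2 p3
    have hcc : List.range' h (d + 1) = List.range' h d ++ [h + d] := by
      rw [List.range'_concat]
      simp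
    rw [hcc, List.foldl_append, List.foldl_cons, List.foldl_nil, hFeq]
    have hFin : r0 + k0 * h < Fa.length := by rw [p1]; omega
    obtain ⟨s1, s2, s3, s4⟩ := stepA_sim h hh r0 k0 hr0h Fa Fm hFin
    rw [hdm] at s1 s2 s3 s4
    refine ⟨?_, ?_, ?_⟩
    · rw [s1, p1]
    · intro r hr
      by_cases hrr : r = r0
      · rw [hrr, s2, p2 r0 hr0h, hsplit]
        rfl
      · rw [s3 r hr hrr, p2 r hr,
            tcnt_succ (h + d) r h hh hr (by omega), if_neg hrr, Nat.add_zero]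
    · rw [s4, p3, p2 r0 hr0h]
      have hnew : ∀ r ∈ Finset.range h,
          ((List.range' 1 (tcnt (h + d + 1) r h)).foldl cstep (extractB a r h, 0)).2
          = ((List.range' 1 (tcnt (h + d) r h)).foldl cstep (extractB a r h, 0)).2
            + (if r = r0 then 2 + ((classStep
                (((List.range' 1 (tcnt (h + d) r0 h)).foldl cstep (extractB a r0 h, 0)).1)
                k0).2 : Int) else 0) := by
        intro r hr'
        have hrh := Finset.mem_range.mp hr'
        by_cases hrr : r = r0
        · subst hrr
          rw [if_pos rfl, hsplit]
          dsimp only [cstep]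
          ring
        · rw [if_neg hrr, tcnt_succ (h + d) r h hh hrh (by omega), if_neg hrr]
          simp
      rw [Finset.sum_congr rfl hnew, Finset.sum_add_distrib,
          Finset.sum_ite_eq' (Finset.range h) r0 _, if_pos (Finset.mem_range.mpr hr0h)]
      ring

-- ---- pass-level: B's start-loop sorts every class and adds its inversions ----

theorem passB_inv (h : Nat) (hh : 0 < h) (a : List Int) (mov : Int) :
    ∀ m ≤ h,
      ((List.range m).foldl (stepBclass h) (a, mov)).1.length = a.length
      ∧ (∀ r < h, extractB ((List.range m).foldl (stepBclass h) (a, mov)).1 r h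
            = if r < m then sortL (extractB a r h) else extractB a r h)
      ∧ ((List.range m).foldl (stepBclass h) (a, mov)).2
          = mov + ∑ r ∈ Finset.range m, ((invN (extractB a r h) : Int)) := by
  intro m
  induction m with
  | zero =>
    intro hm
    refine ⟨rfl, ?_, by simp⟩
    intro r hr
    rw [if_neg (by omega)]
    rfl
  | succ m ihm =>
    intro hm
    obtain ⟨q1, q2, q3⟩ := ihm (by omega)
    rcases hFeq : (List.range m).foldl (stepBclass h) (a, mov) with ⟨Fa, Fm⟩
    rw [hFeq] at q1 q2 q3
    dsimp only at q1 q2 q3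
    rw [List.range_succ, List.foldl_append, List.foldl_cons, List.foldl_nil, hFeq]
    have hexm : extractB Fa m h = extractB a m h := by
      have h2 := q2 m (by omega)
      rwa [if_neg (by omega)] at h2
    dsimp only [stepBclass]
    rw [hexm, msortCount_eq]
    have hsl : (sortL (extractB a m h)).length = clsize Fa.length m h := by
      rw [sortL_length, length_extractB, q1]
    refine ⟨?_, ?_, ?_⟩
    · rw [length_scatterB, q1]
    · intro r hr
      by_cases hrm : r = m
      · subst hrm
        rw [extractB_scatterB_same Fa r h _ hh hsl, if_pos (by omega)]
      · rw [extractB_scatterB_ne Fa m r h _ hh (by omega) hr (fun he => hrm he),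
            q2 r hr]
        by_cases hrm2 : r < m
        · rw [if_pos hrm2, if_pos (by omega)]
        · rw [if_neg hrm2, if_neg (by omega)]
    · rw [Finset.sum_range_succ]
      dsimp only
      rw [q3]
      ring

-- ---- one full pass of A equals one full pass of B ----

theorem pass_eq (h : Nat) (hh : 0 < h) (a : List Int) (mov : Int) :
    (List.range' h (a.length - h)).foldl (stepA h) (a, mov)
      = (List.range h).foldl (stepBclass h) (a, mov + 2 * ((a.length - h : Nat) : Int)) := by
  rcases Nat.lt_or_ge a.length h with hnh | hhn
  · have e0 : a.length - h = 0 := by omega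
    have hshort : ∀ r, r < h → (extractB a r h).length ≤ 1 := by
      intro r hr
      rw [length_extractB]
      rcases Nat.lt_or_ge r a.length with hc | hc
      · rw [clsize_pos_eq a.length r h hh hc]
        have : (a.length - r - 1) / h = 0 := Nat.div_eq_of_lt (by omega)
        omega
      · rw [clsize_zero a.length r h hh hc]
        omega
    obtain ⟨q1, q2, q3⟩ :=
      passB_inv h hh a (mov + 2 * ((a.length - h : Nat) : Int)) h (le_refl h)
    rcases hFeq : (List.range h).foldl (stepBclass h)
        (a, mov + 2 * ((a.length - h : Nat) : Int)) with ⟨Fa, Fm⟩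
    rw [hFeq] at q1 q2 q3
    dsimp only at q1 q2 q3
    have hAeq : Fa = a := by
      apply eq_of_extractB Fa a h hh q1
      intro r hr
      have h2 := q2 r hr
      rw [if_pos hr] at h2
      rw [h2, sortL_short _ (hshort r hr)]
    have hMeq : Fm = mov := by
      have hz : ∀ r ∈ Finset.range h, ((invN (extractB a r h) : Int)) = 0 := by
        intro r hr
        rw [invN_short _ (hshort r (Finset.mem_range.mp hr))]
        simp
      rw [q3, Finset.sum_congr rfl hz, e0]
      simp
    rw [e0, hAeq, hMeq]
    rfl
  · obtain ⟨p1, p2, p3⟩ := passA_inv h hh a mov (a.length - h) (by omega)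
    obtain ⟨q1, q2, q3⟩ :=
      passB_inv h hh a (mov + 2 * ((a.length - h : Nat) : Int)) h (le_refl h)
    have hn : h + (a.length - h) = a.length := by omega
    rw [hn] at p2 p3
    have htc : ∀ r, tcnt a.length r h = (extractB a r h).length - 1 := by
      intro r
      rw [length_extractB]
      exact tcnt_clsize a.length r h hh
    rcases hAeq : (List.range' h (a.length - h)).foldl (stepA h) (a, mov) with ⟨Aa, Am⟩
    rcases hBeq : (List.range h).foldl (stepBclass h)
        (a, mov + 2 * ((a.length - h : Nat) : Int)) with ⟨Ba, Bm⟩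
    rw [hAeq] at p1 p2 p3
    rw [hBeq] at q1 q2 q3
    dsimp only at p1 p2 p3 q1 q2 q3
    have hext : ∀ r < h, extractB Aa r h = extractB Ba r h := by
      intro r hr
      rw [p2 r hr, q2 r hr, if_pos hr, htc r, classRun_eq]
    have h12 : Aa = Ba := eq_of_extractB Aa Ba h hh (by rw [p1, q1]) hext
    have hterm : ∀ r ∈ Finset.range h,
        ((List.range' 1 (tcnt a.length r h)).foldl cstep (extractB a r h, 0)).2
        = ((invN (extractB a r h) : Int)) + 2 * ((tcnt a.length r h : Nat) : Int) := by
      intro r hr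
      rw [htc r, classRun_eq, ← htc r]
      push_cast
      ring
    have hsum : ∑ r ∈ Finset.range h, ((tcnt a.length r h : Nat) : Int)
        = ((a.length - h : Nat) : Int) := by
      rw [← Nat.cast_sum, sum_tcnt a.length h hh]
    have hcnt : Am = Bm := by
      rw [p3, q3, Finset.sum_congr rfl hterm, Finset.sum_add_distrib, ← Finset.mul_sum,
          hsum]
      ring
    rw [h12, hcnt]

theorem passB_len (h : Nat) (hh : 0 < h) (a : List Int) (mov : Int) :
    ((List.range h).foldl (stepBclass h) (a, mov)).1.length = a.length := by
  obtain ⟨q1, -, -⟩ := passB_inv h hh a mov h (le_refl h)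
  exact q1

theorem outer_eq (n : Nat) : ∀ (h : Nat) (st : List Int × Int), st.1.length = n →
    outerA n h st = outerB n h st := by
  intro h
  induction h using Nat.strong_induction_on with
  | _ h ih =>
    rintro ⟨sa, sm⟩ hst
    replace hst : sa.length = n := hst
    rw [outerA, outerB]
    by_cases h0 : h = 0
    · rw [if_pos h0, if_pos h0]
    · rw [if_neg h0, if_neg h0]
      have hp := pass_eq h (Nat.pos_of_ne_zero h0) sa sm
      rw [hst] at hp
      dsimp only
      rw [hp]
      exact ih (h / 3) (by omega) _
        ((passB_len h (Nat.pos_of_ne_zero h0) sa _).trans hst)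

theorem growGap_eq (n3 h : Nat) : growGapA n3 h = growGapB n3 h := by
  fun_induction growGapA with
  | case1 h hlt ih => rw [growGapB, if_pos hlt]; exact ih
  | case2 h hlt => rw [growGapB, if_neg hlt]

-- ===== VERDICT (by name: the statement is the Claim_ definition above) =====
theorem contar_movimientos_shell_spec : Claim_equal_contar_movimientos_shell := by
  intro arreglo _
  unfold Spec_contar_movimientos_shell
  simp only [contar_movimientos_shell, contar_movimientos_shell_alt, growGap_eq]
  rw [outer_eq arreglo.length _ _ rfl]
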